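-- pv_equiv track=rewrite | github.com/zhongpeixiang/CARE | tools/util.py | get_concepts
-- ===== SOURCE A (Python) =====
-- def get_ngrams(utter, n):
--     # utter: a list of tokens
--     # n: up to n-grams
--     total = []
--     for i in range(len(utter)):
--         for j in range(i, max(i-n, -1), -1):
--             total.append("_".join(utter[j:i+1]))
--     return total
--
-- def is_a_ngram_stopword(ngram, stopwords):
--     if ngram in stopwords:
--         return True
--     if "_" in ngram:
--         for w in ngram.split("_"):
--             if w not in stopwords:
--                 return False
--         return True
--     return False
--
-- def get_concepts(tokens, CN_concepts, stopwords):
--     def not_in_ngram(ngram, ngrams):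
--         for x in ngrams:
--             if ngram in x.split("_"):
--                 return False
--         return True
--
--     concepts = []
--     ngrams = sorted(get_ngrams(tokens, 5), key=lambda x: x.count("_"), reverse=True)
--     for ngram in ngrams:
--         if (ngram in CN_concepts) and not_in_ngram(ngram, concepts) and (not is_a_ngram_stopword(ngram, stopwords)):
--             concepts.append(ngram)
--     return concepts
-- ===== SOURCE B (Python) =====
-- def is_a_ngram_stopword(ngram, stopwords):
--     if ngram in stopwords:
--         return True
--     if "_" in ngram:
--         for w in ngram.split("_"):
--             if w not in stopwords:
--                 return False
--         return True
--     return False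
--
-- def _ngrams_ending_at(tokens, i):
--     # the 1..5-grams of tokens ending at position i, shortest first,
--     # each built by prefixing one token to the previous one
--     g = tokens[i]
--     yield g
--     for L in range(2, min(5, i + 1) + 1):
--         g = tokens[i - L + 1] + "_" + g
--         yield g
--
-- def get_concepts(tokens, CN_concepts, stopwords):
--     # Selection by repeated passes instead of materialise-sort-rescan: no candidate
--     # list and no sort are ever built; for each underscore count c, from the largest
--     # occurring down to 0, regenerate the ngrams on the fly and accept those with
--     # exactly c underscores, tracking component tokens of accepted concepts in a set.
--     maxc = max((g.count("_") for i in range(len(tokens))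
--                 for g in _ngrams_ending_at(tokens, i)), default=-1)
--     concepts = []
--     used = set()
--     for c in range(maxc, -1, -1):
--         for i in range(len(tokens)):
--             for g in _ngrams_ending_at(tokens, i):
--                 if g.count("_") == c and g in CN_concepts and g not in used \
--                         and not is_a_ngram_stopword(g, stopwords):
--                     concepts.append(g)
--                     used.update(g.split("_"))
--     return concepts
-- ===== Notes on version B (the rewrite author's own statement) =====
-- stated objective: alternative
-- what changed: Replaces materialise-all-ngrams + global stable sort + per-candidate rescan of the accepted list by selection via repeated passes: compute the maximum underscore count once, then for each count c from that maximum down to 0 regenerate the ngrams on the fly (prefixing one token at a time, no candidate list and no sort ever exist) and accept those with exactly c underscores, tracking component tokens of accepted concepts in a set instead of re-splitting accepted concepts. Mechanism of the measured speed-up: the global stable sort and the per-candidate rescan of the accepted list disappear.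
import Mathlib
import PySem

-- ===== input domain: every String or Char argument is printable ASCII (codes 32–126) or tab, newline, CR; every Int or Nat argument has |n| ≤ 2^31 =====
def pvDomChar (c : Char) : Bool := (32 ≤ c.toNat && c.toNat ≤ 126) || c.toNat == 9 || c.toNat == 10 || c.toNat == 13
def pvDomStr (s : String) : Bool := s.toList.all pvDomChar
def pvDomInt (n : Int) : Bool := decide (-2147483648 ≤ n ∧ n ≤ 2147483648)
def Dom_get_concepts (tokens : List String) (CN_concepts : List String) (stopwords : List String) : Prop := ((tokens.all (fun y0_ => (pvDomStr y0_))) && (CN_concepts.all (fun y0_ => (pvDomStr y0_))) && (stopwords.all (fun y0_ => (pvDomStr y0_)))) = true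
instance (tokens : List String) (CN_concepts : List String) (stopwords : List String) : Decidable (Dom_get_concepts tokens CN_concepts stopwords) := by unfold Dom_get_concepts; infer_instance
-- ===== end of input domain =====

-- B replaces generate-all-ngrams + stable sort + rescan-of-accepted-concepts by selection via
-- repeated regeneration passes, one per underscore count from the maximum down to 0, with a
-- component-token set for the duplicate test (objective: alternative).

-- ===== PORT A =====
-- s.split("_"): PySem.Chars.splitOn is exact for the non-empty separator "_"
def pySplitU (s : String) : List String :=
  (PySem.Chars.splitOn s.toList "_".toList).map String.ofList

def get_ngrams (utter : List String) (n : Int) : List String :=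
  (PySem.List.pyRange 0 utter.length 1).foldl (fun total i =>
    (PySem.List.pyRange i (max (i - n) (-1)) (-1)).foldl (fun total j =>
      total ++ [PySem.Str.join "_" (PySem.List.slice utter (some j) (some (i + 1)))]) total) []

def is_a_ngram_stopword (ngram : String) (stopwords : List String) : Bool :=
  if stopwords.contains ngram then true
  else if PySem.Str.isIn "_" ngram then (pySplitU ngram).all (fun w => stopwords.contains w)
  else false

def not_in_ngram (ngram : String) (ngrams : List String) : Bool :=
  ngrams.all (fun x => !((pySplitU x).contains ngram))

def get_concepts (tokens : List String) (CN_concepts : List String) (stopwords : List String) : List String :=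
  (PySem.List.sorted (get_ngrams tokens 5) (fun x => (PySem.Str.count x "_" : Int)) true).foldl
    (fun concepts ngram =>
      if CN_concepts.contains ngram && not_in_ngram ngram concepts && !(is_a_ngram_stopword ngram stopwords)
      then concepts ++ [ngram] else concepts) []

-- ===== PORT B =====
def altKey (g : String) : Int := (PySem.Str.count g "_" : Int)

-- _ngrams_ending_at(tokens, i) as the list of its yields (state: yields so far, current g)
def ngramsEndingAt (tokens : List String) (i : Int) : List String :=
  let g := PySem.List.pyGetD tokens i ""
  ((PySem.List.pyRange 2 (min 5 (i + 1) + 1) 1).foldl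
    (fun (p : List String × String) L =>
      let g' := PySem.List.pyGetD tokens (i - L + 1) "" ++ "_" ++ p.2
      (p.1 ++ [g'], g'))
    ([g], g)).1

-- max((g.count("_") for …), default=-1)
def altMaxc (tokens : List String) : Int :=
  PySem.List.maxD
    (((PySem.List.pyRange 0 tokens.length 1).flatMap (fun i => ngramsEndingAt tokens i)).map altKey)
    (fun x => x) (-1)

def get_concepts_alt (tokens : List String) (CN_concepts : List String) (stopwords : List String) : List String :=
  let maxc := altMaxc tokens
  ((PySem.List.pyRange maxc (-1) (-1)).foldl
    (fun (st : List String × PySem.Set String) c =>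
      (PySem.List.pyRange 0 tokens.length 1).foldl
        (fun st i =>
          (ngramsEndingAt tokens i).foldl
            (fun (st : List String × PySem.Set String) g =>
              if altKey g == c && CN_concepts.contains g && !(st.2.contains g)
                  && !(is_a_ngram_stopword g stopwords)
              then (st.1 ++ [g], st.2.update (pySplitU g))
              else st) st) st)
    (([] : List String), (PySem.Set.empty : PySem.Set String))).1

-- ===== PRECONDITION & SPEC =====
def Spec_get_concepts (tokens : List String) (CN_concepts : List String) (stopwords : List String) (out : List String) : Prop := out = get_concepts_alt tokens CN_concepts stopwords
instance (tokens : List String) (CN_concepts : List String) (stopwords : List String) (out : List String) : Decidable (Spec_get_concepts tokens CN_concepts stopwords out) := by unfold Spec_get_concepts; infer_instance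

-- ===== CLAIM (what is proved, stated in full; the proofs are below) =====
def Claim_equal_get_concepts : Prop := ∀ (tokens : List String) (CN_concepts : List String) (stopwords : List String), Dom_get_concepts tokens CN_concepts stopwords → Spec_get_concepts tokens CN_concepts stopwords (get_concepts tokens CN_concepts stopwords)

-- ===== LEMMAS AND PROOFS =====

-- strings are determined by their character lists
theorem pvStrExt (s t : String) (h : s.toList = t.toList) : s = t := by
  rw [← String.ofList_toList (s := s), h, String.ofList_toList]

theorem pvJoinSingleton (a : String) : PySem.Str.join "_" [a] = a := by
  apply pvStrExt
  simp [PySem.Str.join, PySem.Chars.join, List.intercalate]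

theorem pvIntercalateCons2 (sep x y : List Char) (t : List (List Char)) :
    List.intercalate sep (x :: y :: t) = x ++ sep ++ List.intercalate sep (y :: t) := by
  simp [List.intercalate, List.intersperse]

theorem pvJoinCons (a : String) (bs : List String) (h : bs ≠ []) :
    PySem.Str.join "_" (a :: bs) = a ++ "_" ++ PySem.Str.join "_" bs := by
  cases bs with
  | nil => exact absurd rfl h
  | cons b t =>
    apply pvStrExt
    simp [PySem.Str.join, PySem.Chars.join, String.toList_append, pvIntercalateCons2]

-- the ngram ending at position i spanning t+1 tokens
def eltOf (tokens : List String) (i : Int) (t : Nat) : String :=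
  PySem.Str.join "_" (PySem.List.slice tokens (some (i - t)) (some (i + 1)))

theorem pvEltZero (tokens : List String) (i : Int) (h0 : 0 ≤ i) (h1 : i < tokens.length) :
    eltOf tokens i 0 = PySem.List.pyGetD tokens i "" := by
  unfold eltOf
  rw [PySem.List.slice_toNat tokens (by omega) (by omega)]
  simp only [Int.natCast_zero, Int.sub_zero]
  have hlt : i.toNat < tokens.length := by omega
  rw [List.drop_eq_getElem_cons hlt]
  have h2 : (i + 1).toNat - i.toNat = 1 := by omega
  rw [h2, List.take_succ_cons, List.take_zero, pvJoinSingleton,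
    PySem.List.pyGetD_eq_getElem tokens "" h0 h1]

theorem pvEltSucc (tokens : List String) (i : Int) (t : Nat)
    (h0 : 0 ≤ i - (t + 1)) (h1 : i < tokens.length) :
    eltOf tokens i (t + 1) = PySem.List.pyGetD tokens (i - (t + 1)) "" ++ "_" ++ eltOf tokens i t := by
  unfold eltOf
  have hc : ((t + 1 : Nat) : Int) = ((t : Int) + 1) := by push_cast; ring
  rw [hc]
  rw [PySem.List.slice_toNat tokens (by omega) (by omega),
      PySem.List.slice_toNat tokens (by omega) (by omega)]
  have ha : (i - ((t : Int) + 1)).toNat < tokens.length := by omega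
  rw [List.drop_eq_getElem_cons ha]
  have h2 : (i + 1).toNat - (i - ((t : Int) + 1)).toNat
      = ((i + 1).toNat - (i - (t : Int)).toNat) + 1 := by omega
  have h3 : (i - ((t : Int) + 1)).toNat + 1 = (i - (t : Int)).toNat := by omega
  rw [h2, List.take_succ_cons, h3]
  have hne : List.take ((i + 1).toNat - (i - (t : Int)).toNat) (List.drop (i - (t : Int)).toNat tokens) ≠ [] := by
    have hlen : (i - (t : Int)).toNat < tokens.length := by omega
    intro hcontra
    rcases List.take_eq_nil_iff.mp hcontra with h | h
    · omega
    · have := List.drop_eq_nil_iff.mp h; omega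
  rw [pvJoinCons _ _ hne,
    PySem.List.pyGetD_eq_getElem tokens "" (by omega) (by omega)]

def blockOf (tokens : List String) (i : Int) : List String :=
  (List.range (min 5 (i + 1)).toNat).map (eltOf tokens i)

theorem pvBlockAEq (tokens : List String) (i : Int) (h0 : 0 ≤ i) :
    (PySem.List.pyRange i (max (i - 5) (-1)) (-1)).map
      (fun j => PySem.Str.join "_" (PySem.List.slice tokens (some j) (some (i + 1))))
      = blockOf tokens i := by
  rw [PySem.List.pyRange_neg_one, List.map_map]
  have h : (i - max (i - 5) (-1)).toNat = (min 5 (i + 1)).toNat := by omega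
  rw [h]
  unfold blockOf
  apply List.map_congr_left
  intro t _
  unfold eltOf
  rfl

theorem pvGetNgramsEq (tokens : List String) :
    get_ngrams tokens 5 = ((PySem.List.pyRange 0 tokens.length 1).map (blockOf tokens)).flatten := by
  unfold get_ngrams
  rw [PySem.List.foldl_congr_mem _ _ (fun total i => total ++ blockOf tokens i) _ (by
    intro acc i hi
    rw [PySem.List.foldl_append_singleton_eq_map]
    rw [pvBlockAEq tokens i (PySem.List.mem_pyRange_one.mp hi).1])]
  rw [PySem.List.foldl_append_eq_flatMap]
  simp [List.flatMap_def]

-- B's incremental regeneration produces exactly the block of ngrams ending at i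
theorem pvNgramsInner (tokens : List String) (i : Int) (h1 : i < tokens.length) :
    ∀ (k : Nat), (1 + (k : Int)) ≤ min 5 (i + 1) →
    (PySem.List.pyRange 2 ((1 + (k : Int)) + 1) 1).foldl
      (fun (p : List String × String) L =>
        let g' := PySem.List.pyGetD tokens (i - L + 1) "" ++ "_" ++ p.2
        (p.1 ++ [g'], g'))
      ([eltOf tokens i 0], eltOf tokens i 0)
      = ((List.range (k + 1)).map (eltOf tokens i), eltOf tokens i k) := by
  intro k
  induction k with
  | zero =>
    intro _
    have h2 : ((1 + ((0 : Nat) : Int)) + 1) = 2 := by norm_num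
    rw [h2]
    have hr : PySem.List.pyRange 2 2 1 = [] := by decide
    rw [hr, List.foldl_nil]
    simp
  | succ k ihk =>
    intro hbound
    have h2 : ((1 + ((k + 1 : Nat) : Int)) + 1) = ((1 + (k : Int)) + 1) + 1 := by push_cast; ring
    rw [h2, PySem.List.pyRange_one_succ_right (by omega), List.foldl_append]
    rw [ihk (by push_cast at hbound ⊢; omega)]
    have hg : PySem.List.pyGetD tokens (i - ((1 + (k : Int)) + 1) + 1) "" ++ "_" ++ eltOf tokens i k
        = eltOf tokens i (k + 1) := by
      have he : i - ((1 + (k : Int)) + 1) + 1 = i - ((k : Int) + 1) := by ring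
      rw [he, ← pvEltSucc tokens i k (by push_cast at hbound ⊢; omega) h1]
    simp only [List.foldl_cons, List.foldl_nil, hg, List.range_succ, List.map_append,
      List.map_cons, List.map_nil]

theorem pvNgramsBlock (tokens : List String) (i : Int) (h0 : 0 ≤ i) (h1 : i < tokens.length) :
    ngramsEndingAt tokens i = blockOf tokens i := by
  unfold ngramsEndingAt blockOf
  have hm : (1 : Int) ≤ min 5 (i + 1) := by omega
  have hk : (1 + (((min 5 (i + 1)).toNat - 1 : Nat) : Int)) = min 5 (i + 1) := by omega
  have hgz : PySem.List.pyGetD tokens i "" = eltOf tokens i 0 :=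
    (pvEltZero tokens i h0 h1).symm
  simp only [hgz]
  have := pvNgramsInner tokens i h1 ((min 5 (i + 1)).toNat - 1) (by rw [hk])
  rw [hk] at this
  have hkk : (min 5 (i + 1)).toNat - 1 + 1 = (min 5 (i + 1)).toNat := by omega
  rw [hkk] at this
  rw [this]

theorem pvCandEq (tokens : List String) :
    (PySem.List.pyRange 0 tokens.length 1).flatMap (fun i => ngramsEndingAt tokens i)
      = get_ngrams tokens 5 := by
  rw [pvGetNgramsEq, List.flatMap_def]
  apply congrArg
  apply List.map_congr_left
  intro i hi
  obtain ⟨h0, h1⟩ := PySem.List.mem_pyRange_one.mp hi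
  exact pvNgramsBlock tokens i h0 h1

-- every candidate's key is bounded by B's maxc
theorem pvKeyLeLimit (tokens : List String) (g : String) (hg : g ∈ get_ngrams tokens 5) :
    altKey g ≤ altMaxc tokens := by
  unfold altMaxc
  rw [pvCandEq]
  have hk : altKey g ∈ (get_ngrams tokens 5).map altKey := List.mem_map_of_mem hg
  cases hm : PySem.List.max? ((get_ngrams tokens 5).map altKey) (fun x => x) with
  | none =>
    rw [(PySem.List.max?_eq_none_iff _ _).mp hm] at hk
    simp at hk
  | some m =>
    have := PySem.List.max?_isMax hm (altKey g) hk
    simp only [PySem.List.maxD, hm, Option.getD_some]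
    exact this

-- ===== insertion-sort bucketing =====
theorem pvInsertByAppendLeft {α : Type} (before : α → α → Bool) (x : α) (zs ws : List α)
    (h : ∀ y ∈ zs, before x y = false) :
    PySem.List.insertBy before x (zs ++ ws) = zs ++ PySem.List.insertBy before x ws := by
  induction zs with
  | nil => simp
  | cons z zs ih =>
    have hz := h z (by simp)
    simp only [List.cons_append, PySem.List.insertBy, hz, Bool.false_eq_true, if_false]
    rw [ih (fun y hy => h y (by simp [hy]))]

theorem pvInsertByAllBefore {α : Type} (before : α → α → Bool) (x : α) (ws : List α)
    (h : ∀ y ∈ ws, before x y = true) :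
    PySem.List.insertBy before x ws = x :: ws := by
  cases ws with
  | nil => rfl
  | cons w ws => simp only [PySem.List.insertBy, h w (by simp), if_true]

theorem pvInsertByBuckets {α : Type} (key : α → Int) (x : α) (cs : List Int) (B : Int → List α)
    (hdesc : cs.Pairwise (· > ·)) (hB : ∀ c ∈ cs, ∀ y ∈ B c, key y = c) (hk : key x ∈ cs) :
    PySem.List.insertBy (fun a b => decide (key b < key a)) x ((cs.map B).flatten)
      = (cs.map (fun c => if key x = c then B c ++ [x] else B c)).flatten := by
  induction cs with
  | nil => simp at hk
  | cons c cs ih =>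
    simp only [List.map_cons, List.flatten_cons]
    have hlt : ∀ c' ∈ cs, c' < c := fun c' hc' => (List.pairwise_cons.mp hdesc).1 c' hc'
    by_cases hx : key x = c
    · rw [pvInsertByAppendLeft _ _ _ _ (by
        intro y hy
        have := hB c (by simp) y hy
        simp [this, hx])]
      rw [pvInsertByAllBefore _ _ _ (by
        intro y hy
        rcases List.mem_flatten.mp hy with ⟨l, hl, hyl⟩
        rcases List.mem_map.mp hl with ⟨c', hc', rfl⟩
        have hkey := hB c' (by simp [hc']) y hyl
        have := hlt c' hc'
        simp [hkey, hx]; omega)]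
      have htail : cs.map (fun c' => if key x = c' then B c' ++ [x] else B c') = cs.map B := by
        apply List.map_congr_left
        intro c' hc'
        have := hlt c' hc'
        have : key x ≠ c' := by omega
        simp [this]
      rw [if_pos hx, htail]
      simp
    · have hk' : key x ∈ cs := by
        rcases List.mem_cons.mp hk with h | h
        · exact absurd h hx
        · exact h
      rw [pvInsertByAppendLeft _ _ _ _ (by
        intro y hy
        have hkey := hB c (by simp) y hy
        have := hlt _ hk'
        simp [hkey]; omega)]
      rw [ih (List.pairwise_cons.mp hdesc).2 (fun c' hc' => hB c' (by simp [hc'])) hk']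
      rw [if_neg hx]

theorem pvSortedRevBuckets {α : Type} (key : α → Int) (xs : List α) (cs : List Int)
    (hdesc : cs.Pairwise (· > ·)) (hmem : ∀ x ∈ xs, key x ∈ cs) :
    PySem.List.sorted xs key true
      = (cs.map (fun c => xs.filter (fun x => key x == c))).flatten := by
  rw [PySem.List.sorted_rev_eq_foldl_insertBy]
  induction xs using List.reverseRecOn with
  | nil =>
    simp only [List.foldl_nil, List.filter_nil]
    symm
    rw [List.flatten_eq_nil_iff]
    intro l hl
    rcases List.mem_map.mp hl with ⟨c, _, rfl⟩
    rfl
  | append_singleton xs x ih =>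
    rw [List.foldl_append, List.foldl_cons, List.foldl_nil]
    rw [ih (fun y hy => hmem y (by simp [hy]))]
    rw [pvInsertByBuckets key x cs (fun c => xs.filter (fun y => key y == c)) hdesc
      (by intro c _ y hy; exact by simpa using (List.of_mem_filter hy))
      (hmem x (by simp))]
    apply congrArg
    apply List.map_congr_left
    intro c _
    rw [List.filter_append]
    by_cases h : key x = c
    · simp [h]
    · have : (key x == c) = false := by simp [h]
      simp [this, h]

-- the descending pass-index list
theorem pvCsPairwise (limit : Int) : (PySem.List.pyRange limit (-1) (-1)).Pairwise (· > ·) := by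
  rw [PySem.List.pyRange_neg_one, List.pairwise_map]
  exact List.pairwise_lt_range.imp (by intro a b h; omega)

theorem pvMemCs (limit x : Int) (h0 : 0 ≤ x) (h1 : x ≤ limit) :
    x ∈ PySem.List.pyRange limit (-1) (-1) := by
  rw [PySem.List.pyRange_neg_one]
  refine List.mem_map.mpr ⟨(limit - x).toNat, List.mem_range.mpr (by omega), by omega⟩

-- a fold whose step is guarded by p is a fold over the filtered list
theorem pvFoldlGuard {α β : Type} (p : α → Bool) (f : β → α → β) (l : List α) :
    ∀ (st : β), l.foldl (fun st g => if p g then f st g else st) st = (l.filter p).foldl f st := by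
  induction l with
  | nil => intro st; rfl
  | cons x l ih =>
    intro st
    by_cases hx : p x = true
    · simp only [List.foldl_cons, List.filter_cons, hx, if_pos, ih]
    · simp only [List.foldl_cons, List.filter_cons, hx, Bool.false_eq_true, if_false, ih]

-- ===== the accumulator pair: used-token set vs rescan of accepted concepts =====
theorem pvPhase2 (CN_concepts stopwords : List String) :
    ∀ (gs : List String) (acc : List String) (used : PySem.Set String),
    (∀ s : String, used.contains s = true ↔ ∃ c ∈ acc, s ∈ pySplitU c) →
    (gs.foldl (fun (st : List String × PySem.Set String) ngram =>
        if CN_concepts.contains ngram && !(st.2.contains ngram) && !(is_a_ngram_stopword ngram stopwords)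
        then (st.1 ++ [ngram], st.2.update (pySplitU ngram))
        else st) (acc, used)).1
      = gs.foldl (fun concepts ngram =>
          if CN_concepts.contains ngram && not_in_ngram ngram concepts && !(is_a_ngram_stopword ngram stopwords)
          then concepts ++ [ngram] else concepts) acc := by
  intro gs
  induction gs with
  | nil => intro acc used _; rfl
  | cons g gs ih =>
    intro acc used hinv
    have hng : not_in_ngram g acc = !used.contains g := by
      cases hu : used.contains g with
      | true =>
        obtain ⟨c, hc, hmem⟩ := (hinv g).mp hu
        have hcc : (pySplitU c).contains g = true := List.contains_iff_mem.mpr hmem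
        have hn : not_in_ngram g acc = false := by
          cases hn : not_in_ngram g acc with
          | false => rfl
          | true =>
            have hn' : acc.all (fun x => !((pySplitU x).contains g)) = true := by
              simpa only [not_in_ngram] using hn
            have h2 := List.all_eq_true.mp hn' c hc
            simp only [Bool.not_eq_true'] at h2
            rw [hcc] at h2
            simp at h2
        rw [hn]
        simp
      | false =>
        have hall : ∀ x ∈ acc, (pySplitU x).contains g = false := by
          intro x hx
          cases hxc : (pySplitU x).contains g with
          | false => rfl
          | true =>
            have : used.contains g = true :=
              (hinv g).mpr ⟨x, hx, List.contains_iff_mem.mp hxc⟩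
            rw [this] at hu
            exact absurd hu (by simp)
        simp only [not_in_ngram, Bool.not_false]
        rw [List.all_eq_true]
        intro x hx
        simp only [Bool.not_eq_true']
        exact hall x hx
    simp only [List.foldl_cons, hng]
    by_cases hcond : (CN_concepts.contains g && !used.contains g && !(is_a_ngram_stopword g stopwords)) = true
    · rw [if_pos hcond, if_pos hcond]
      apply ih
      intro s
      rw [PySem.Set.contains_iff, PySem.Set.mem_update]
      constructor
      · intro h
        rcases h with h | h
        · rcases (hinv s).mp ((PySem.Set.contains_iff used s).mpr h) with ⟨c, hc, hm⟩
          exact ⟨c, by simp [hc], hm⟩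
        · exact ⟨g, by simp, h⟩
      · rintro ⟨c, hc, hm⟩
        rcases List.mem_append.mp hc with hc | hc
        · exact Or.inl ((PySem.Set.contains_iff used s).mp ((hinv s).mpr ⟨c, hc, hm⟩))
        · rw [List.mem_singleton.mp hc] at hm
          exact Or.inr hm
    · rw [if_neg hcond, if_neg hcond]
      exact ih acc used hinv

-- ===== assembly =====
theorem pvMainEq (tokens CN_concepts stopwords : List String) :
    get_concepts tokens CN_concepts stopwords = get_concepts_alt tokens CN_concepts stopwords := by
  unfold get_concepts get_concepts_alt
  simp only []
  set cand := get_ngrams tokens 5 with hcand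
  set cs := PySem.List.pyRange (altMaxc tokens) (-1) (-1) with hcs
  -- B's step for pass c, guard on the count peeled off
  have hstep : ∀ (c : Int) (st : List String × PySem.Set String) (g : String),
      (if altKey g == c && CN_concepts.contains g && !(st.2.contains g)
          && !(is_a_ngram_stopword g stopwords)
       then (st.1 ++ [g], st.2.update (pySplitU g)) else st)
      = (if altKey g == c then
          (if CN_concepts.contains g && !(st.2.contains g) && !(is_a_ngram_stopword g stopwords)
           then (st.1 ++ [g], st.2.update (pySplitU g)) else st)
         else st) := by
    intro c st g
    by_cases h : (altKey g == c) = true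
    · simp [h]
    · simp [h]
  have hsorted : PySem.List.sorted cand (fun x => (PySem.Str.count x "_" : Int)) true
      = (cs.map (fun c => cand.filter (fun g => altKey g == c))).flatten := by
    apply pvSortedRevBuckets altKey cand cs (pvCsPairwise _)
    intro x hx
    exact pvMemCs _ (altKey x) (by unfold altKey; positivity) (pvKeyLeLimit tokens x hx)
  -- B's triple loop as one fold over the sorted candidate list
  have hB : ((cs.foldl
      (fun (st : List String × PySem.Set String) c =>
        (PySem.List.pyRange 0 tokens.length 1).foldl
          (fun st i =>
            (ngramsEndingAt tokens i).foldl
              (fun (st : List String × PySem.Set String) g =>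
                if altKey g == c && CN_concepts.contains g && !(st.2.contains g)
                    && !(is_a_ngram_stopword g stopwords)
                then (st.1 ++ [g], st.2.update (pySplitU g)) else st) st) st)
      (([] : List String), (PySem.Set.empty : PySem.Set String)))).1
      = ((cs.map (fun c => cand.filter (fun g => altKey g == c))).flatten.foldl
          (fun (st : List String × PySem.Set String) ngram =>
            if CN_concepts.contains ngram && !(st.2.contains ngram) && !(is_a_ngram_stopword ngram stopwords)
            then (st.1 ++ [ngram], st.2.update (pySplitU ngram))
            else st) (([] : List String), (PySem.Set.empty : PySem.Set String))).1 := by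
    rw [List.foldl_flatten, List.foldl_map]
    apply congrArg
    apply PySem.List.foldl_congr_mem
    intro st c _
    -- the pass over i of folds over ngramsEndingAt = one fold over the flatMap = over cand
    have hflat : ∀ (st : List String × PySem.Set String),
        (PySem.List.pyRange 0 tokens.length 1).foldl
          (fun st i =>
            (ngramsEndingAt tokens i).foldl
              (fun (st : List String × PySem.Set String) g =>
                if altKey g == c && CN_concepts.contains g && !(st.2.contains g)
                    && !(is_a_ngram_stopword g stopwords)
                then (st.1 ++ [g], st.2.update (pySplitU g)) else st) st) st
        = cand.foldl
            (fun (st : List String × PySem.Set String) g =>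
              if altKey g == c && CN_concepts.contains g && !(st.2.contains g)
                  && !(is_a_ngram_stopword g stopwords)
              then (st.1 ++ [g], st.2.update (pySplitU g)) else st) st := by
      intro st
      rw [hcand, ← pvCandEq tokens, List.flatMap_def, List.foldl_flatten, List.foldl_map]
    rw [hflat st]
    rw [PySem.List.foldl_congr_mem _ _ _ _ (fun st g _ => hstep c st g)]
    rw [pvFoldlGuard]
  rw [hsorted, hB]
  rw [pvPhase2 CN_concepts stopwords _ [] PySem.Set.empty (by
    intro s
    constructor
    · intro h; simp [PySem.Set.empty] at h
    · rintro ⟨c, hc, _⟩; simp at hc)]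

-- ===== VERDICT (by name: the statement is the Claim_ definition above) =====
theorem get_concepts_spec : Claim_equal_get_concepts := by
  intro tokens CN_concepts stopwords _
  unfold Spec_get_concepts
  exact pvMainEq tokens CN_concepts stopwords
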